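-- pv_equiv track=rewrite | github.com/TWian1/3d-Object-Viewer | main.py | upscale
-- ===== SOURCE A (Python) =====
-- def upscale(pixelsarray, scale, limx, limy):
--   out = []
--   for a in range(len(pixelsarray)*scale):
--     out.append([])
--     for b in range(len(pixelsarray[0])*scale):out[a].append([])
--   for a in range(len(pixelsarray)):
--     for b in range(len(pixelsarray[0])):
--       for c in range(scale):
--         for d in range(scale): out[(a*scale)+c][(b*scale)+d] = pixelsarray[a][b]
--   return out
-- ===== SOURCE B (Python) =====
-- def upscale(pixelsarray, scale, limx, limy):
--   out = []
--   width = len(pixelsarray[0]) if pixelsarray else 0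
--   for row in pixelsarray:
--     scaled = [row[b] for b in range(width) for _ in range(scale)]
--     for _ in range(scale):
--       out.append(scaled[:])
--   return out
-- ===== Notes on version B (the rewrite author's own statement) =====
-- stated objective: simpler
-- what changed: B builds each scaled row once and appends scale independent copies per input row in a single pass, instead of A's pre-allocating an empty grid and scattering every pixel by computed indices in four nested loops.
import Mathlib
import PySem

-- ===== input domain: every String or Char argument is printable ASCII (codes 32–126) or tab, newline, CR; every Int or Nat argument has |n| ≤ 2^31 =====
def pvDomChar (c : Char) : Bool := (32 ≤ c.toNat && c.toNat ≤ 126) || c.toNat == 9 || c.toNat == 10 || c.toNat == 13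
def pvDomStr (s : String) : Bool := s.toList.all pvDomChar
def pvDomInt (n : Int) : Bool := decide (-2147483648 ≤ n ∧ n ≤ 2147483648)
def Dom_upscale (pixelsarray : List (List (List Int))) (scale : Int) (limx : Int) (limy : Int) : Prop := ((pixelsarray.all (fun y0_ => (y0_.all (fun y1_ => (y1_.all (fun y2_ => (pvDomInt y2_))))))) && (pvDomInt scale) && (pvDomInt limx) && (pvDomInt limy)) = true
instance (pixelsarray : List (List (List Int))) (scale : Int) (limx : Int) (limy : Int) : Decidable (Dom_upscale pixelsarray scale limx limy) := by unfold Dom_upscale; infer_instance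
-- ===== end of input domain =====

-- B builds each scaled row once and replicates it per input row in one pass, instead of
-- A's allocate-then-scatter-by-index strategy; same asymptotic cost, simpler decomposition.


-- ===== PORT A =====
-- out[i][j] = v  (Python's assignment; indices are always in range on A's loop bounds)
def pySet2 (g : List (List (List Int))) (i j : Nat) (v : List Int) : List (List (List Int)) :=
  g.set i ((g.getD i []).set j v)

def upscale (pixelsarray : List (List (List Int))) (scale : Int) (limx : Int) (limy : Int) : List (List (List Int)) :=
  let w := (pixelsarray.headD []).length
  -- first loop pair: allocate the empty grid (each inner row built by appending [] w*scale times)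
  let out := (List.range (((pixelsarray.length : Int) * scale).toNat)).foldl
      (fun out _ => out ++ [(List.range (((w : Int) * scale).toNat)).foldl (fun row _ => row ++ [([] : List Int)]) []]) []
  let s := scale.toNat
  -- second loop nest: scatter each pixel to its scale×scale block by index assignment
  (List.range pixelsarray.length).foldl (fun out a =>
    (List.range w).foldl (fun out b =>
      (List.range s).foldl (fun out c =>
        (List.range s).foldl (fun out d =>
          pySet2 out (a*s + c) (b*s + d) ((pixelsarray.getD a []).getD b [])) out) out) out) out

-- ===== PORT B =====
def upscale_alt (pixelsarray : List (List (List Int))) (scale : Int) (limx : Int) (limy : Int) : List (List (List Int)) :=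
  let width := (pixelsarray.headD []).length
  pixelsarray.foldl (fun out row =>
    let scaled := (List.range width).flatMap (fun b => List.replicate scale.toNat (row.getD b []))
    out ++ List.replicate scale.toNat scaled) []

-- ===== PRECONDITION & SPEC =====
-- Pre_ excludes exactly the inputs where Python A raises IndexError: scale ≥ 1 and some row
-- shorter than row 0 (B raises IndexError on exactly the same inputs).
def Pre_upscale (pixelsarray : List (List (List Int))) (scale : Int) (limx : Int) (limy : Int) : Prop :=
  0 < scale → ∀ row ∈ pixelsarray, (pixelsarray.headD []).length ≤ row.length
instance (pixelsarray : List (List (List Int))) (scale : Int) (limx : Int) (limy : Int) : Decidable (Pre_upscale pixelsarray scale limx limy) := by unfold Pre_upscale; infer_instance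

def pvWitness_upscale : List (List (List Int)) × Int × Int × Int := ([[[1]], [[2]]], 2, 0, 0)

def Spec_upscale (pixelsarray : List (List (List Int))) (scale : Int) (limx : Int) (limy : Int) (out : List (List (List Int))) : Prop := out = upscale_alt pixelsarray scale limx limy
instance (pixelsarray : List (List (List Int))) (scale : Int) (limx : Int) (limy : Int) (out : List (List (List Int))) : Decidable (Spec_upscale pixelsarray scale limx limy out) := by unfold Spec_upscale; infer_instance

-- ===== CLAIM (what is proved, stated in full; the proofs are below) =====
def Claim_equal_upscale : Prop := ∀ (pixelsarray : List (List (List Int))) (scale : Int) (limx : Int) (limy : Int), Dom_upscale pixelsarray scale limx limy → Pre_upscale pixelsarray scale limx limy → Spec_upscale pixelsarray scale limx limy (upscale pixelsarray scale limx limy)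

-- ===== LEMMAS AND PROOFS =====

theorem upscale_toNat_cast_mul (n : Nat) (z : Int) : ((n : Int) * z).toNat = n * z.toNat := by
  cases z with
  | ofNat k =>
    rw [Int.ofNat_eq_natCast, ← Nat.cast_mul, Int.toNat_natCast, Int.toNat_natCast]
  | negSucc k =>
    have h1 : ((n : Int) * Int.negSucc k).toNat = 0 := by
      apply Int.toNat_of_nonpos
      exact mul_nonpos_iff.mpr (Or.inl ⟨Int.natCast_nonneg n, le_of_lt (Int.negSucc_lt_zero k)⟩)
    rw [h1, Int.toNat_negSucc, Nat.mul_zero]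

theorem upscale_foldl_id {α β : Type} (l : List α) (g : β) : l.foldl (fun x _ => x) g = g := by
  induction l generalizing g with
  | nil => rfl
  | cons h t ih => simp [List.foldl, ih]

theorem upscale_foldl_snoc {β : Type} (k : Nat) (x : β) (init : List β) :
    (List.range k).foldl (fun acc (_ : Nat) => acc ++ [x]) init = init ++ List.replicate k x := by
  induction k generalizing init with
  | zero => simp
  | succ k ih =>
    rw [List.range_succ, List.foldl_append]
    simp [ih, List.replicate_succ']

theorem upscale_block_lt {a c s n : Nat} (ha : a < n) (hc : c < s) : a * s + c < n * s :=
  calc a * s + c < a * s + s := by omega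
    _ = (a + 1) * s := by ring
    _ ≤ n * s := Nat.mul_le_mul_right s ha

-- the cell (i,j) of the grid, as Python reads/writes it in-range
def gg (g : List (List (List Int))) (i j : Nat) : List Int := (g.getD i []).getD j []

theorem upscale_getD_set2_len (g : List (List (List Int))) (i j : Nat) (v : List Int) (i' : Nat) :
    ((pySet2 g i j v).getD i' []).length = (g.getD i' []).length := by
  unfold pySet2
  simp only [List.getD_eq_getElem?_getD, List.getElem?_set]
  by_cases h1 : i = i'
  · subst h1
    by_cases h2 : i < g.length
    · rw [if_pos rfl, if_pos h2]
      simp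
    · rw [if_pos rfl, if_neg h2, List.getElem?_eq_none (by omega)]
  · rw [if_neg h1]

theorem upscale_len_set2 (g : List (List (List Int))) (i j : Nat) (v : List Int) :
    (pySet2 g i j v).length = g.length := by
  unfold pySet2; simp

theorem upscale_gg_set2 (g : List (List (List Int))) (i j i' j' : Nat) (v : List Int)
    (hi : i < g.length) (hj : j < (g.getD i []).length) :
    gg (pySet2 g i j v) i' j' =
      if i' = i ∧ j' = j then v else gg g i' j' := by
  rw [List.getD_eq_getElem?_getD] at hj
  unfold gg pySet2
  simp only [List.getD_eq_getElem?_getD, List.getElem?_set]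
  by_cases hii : i = i'
  · subst hii
    rw [if_pos rfl, if_pos hi]
    simp only [Option.getD_some, List.getElem?_set]
    by_cases hjj : j = j'
    · subst hjj
      rw [if_pos rfl, if_pos hj]
      simp
    · rw [if_neg hjj, if_neg (by omega)]
  · rw [if_neg hii, if_neg (by omega)]

theorem upscale_dfold (s I J : Nat) (v : List Int) (g : List (List (List Int)))
    (hI : I < g.length) (hJ : J + s ≤ (g.getD I []).length) :
    let g' := (List.range s).foldl (fun out d => pySet2 out I (J + d) v) g
    (∀ d < s, gg g' I (J + d) = v) ∧
    (∀ i j, (i ≠ I ∨ j < J ∨ J + s ≤ j) → gg g' i j = gg g i j) ∧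
    g'.length = g.length ∧ (∀ i, (g'.getD i []).length = (g.getD i []).length) := by
  induction s with
  | zero => exact ⟨by omega, fun _ _ _ => rfl, rfl, fun _ => rfl⟩
  | succ s ih =>
    have ihh := ih (by omega)
    obtain ⟨h1, h2, h3, h4⟩ := ihh
    set gs := (List.range s).foldl (fun out d => pySet2 out I (J + d) v) g with hgs
    have hfold : (List.range (s+1)).foldl (fun out d => pySet2 out I (J + d) v) g
        = pySet2 gs I (J + s) v := by
      rw [List.range_succ, List.foldl_append]; rfl
    have hIl : I < gs.length := by omega
    have hJl : J + s < (gs.getD I []).length := by rw [h4]; omega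
    refine ⟨?_, ?_, ?_, ?_⟩
    · intro d hd
      rw [hfold, upscale_gg_set2 _ _ _ _ _ _ hIl hJl]
      by_cases hds : d = s
      · simp [hds]
      · rw [if_neg (by omega), h1 d (by omega)]
    · intro i j hcond
      rw [hfold, upscale_gg_set2 _ _ _ _ _ _ hIl hJl, if_neg (by omega), h2 i j (by omega)]
    · rw [hfold, upscale_len_set2]; exact h3
    · intro i; rw [hfold, upscale_getD_set2_len]; exact h4 i

theorem upscale_cfold (s R J : Nat) (v : List Int) (g : List (List (List Int)))
    (hR : R + s ≤ g.length) (hW : ∀ i, i < g.length → J + s ≤ (g.getD i []).length) :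
    let g' := (List.range s).foldl (fun out c =>
        (List.range s).foldl (fun out d => pySet2 out (R + c) (J + d) v) out) g
    (∀ c < s, ∀ d < s, gg g' (R + c) (J + d) = v) ∧
    (∀ i j, (i < R ∨ R + s ≤ i ∨ j < J ∨ J + s ≤ j) → gg g' i j = gg g i j) ∧
    g'.length = g.length ∧ (∀ i, (g'.getD i []).length = (g.getD i []).length) := by
  have main : ∀ (t : Nat), t ≤ s →
      let g' := (List.range t).foldl (fun out c =>
          (List.range s).foldl (fun out d => pySet2 out (R + c) (J + d) v) out) g
      (∀ c < t, ∀ d < s, gg g' (R + c) (J + d) = v) ∧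
      (∀ i j, (i < R ∨ R + t ≤ i ∨ j < J ∨ J + s ≤ j) → gg g' i j = gg g i j) ∧
      g'.length = g.length ∧ (∀ i, (g'.getD i []).length = (g.getD i []).length) := by
    intro t
    induction t with
    | zero => exact fun _ => ⟨by omega, fun _ _ _ => rfl, rfl, fun _ => rfl⟩
    | succ t ih =>
      intro hts
      obtain ⟨h1, h2, h3, h4⟩ := ih (by omega)
      set gt := (List.range t).foldl (fun out c =>
          (List.range s).foldl (fun out d => pySet2 out (R + c) (J + d) v) out) g with hgt
      have hfold : (List.range (t+1)).foldl (fun out c =>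
          (List.range s).foldl (fun out d => pySet2 out (R + c) (J + d) v) out) g
          = (List.range s).foldl (fun out d => pySet2 out (R + t) (J + d) v) gt := by
        rw [List.range_succ, List.foldl_append]; rfl
      have hIl : R + t < gt.length := by omega
      have hJl : J + s ≤ (gt.getD (R + t) []).length := by
        rw [h4]; exact hW _ (by omega)
      obtain ⟨d1, d2, d3, d4⟩ := upscale_dfold s (R + t) J v gt hIl hJl
      refine ⟨?_, ?_, ?_, ?_⟩
      · intro c hc d hd
        rw [hfold]
        by_cases hct : c = t
        · subst hct; exact d1 d hd
        · rw [d2 _ _ (by omega), h1 c (by omega) d hd]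
      · intro i j hcond
        rw [hfold, d2 i j (by omega), h2 i j (by omega)]
      · rw [hfold, d3]; exact h3
      · intro i; rw [hfold, d4]; exact h4 i
  exact main s le_rfl

theorem upscale_bfold (s R m : Nat) (row : List (List Int)) (g : List (List (List Int)))
    (hR : R + s ≤ g.length) (hW : ∀ i, i < g.length → m * s ≤ (g.getD i []).length) :
    let g' := (List.range m).foldl (fun out b =>
        (List.range s).foldl (fun out c =>
          (List.range s).foldl (fun out d => pySet2 out (R + c) (b*s + d) (row.getD b [])) out) out) g
    (∀ b < m, ∀ c < s, ∀ d < s, gg g' (R + c) (b*s + d) = row.getD b []) ∧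
    (∀ i j, (i < R ∨ R + s ≤ i) → gg g' i j = gg g i j) ∧
    g'.length = g.length ∧ (∀ i, (g'.getD i []).length = (g.getD i []).length) := by
  have main : ∀ (t : Nat), t ≤ m →
      let g' := (List.range t).foldl (fun out b =>
          (List.range s).foldl (fun out c =>
            (List.range s).foldl (fun out d => pySet2 out (R + c) (b*s + d) (row.getD b [])) out) out) g
      (∀ b < t, ∀ c < s, ∀ d < s, gg g' (R + c) (b*s + d) = row.getD b []) ∧
      (∀ i j, (i < R ∨ R + s ≤ i) → gg g' i j = gg g i j) ∧
      g'.length = g.length ∧ (∀ i, (g'.getD i []).length = (g.getD i []).length) := by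
    intro t
    induction t with
    | zero => exact fun _ => ⟨by omega, fun _ _ _ => rfl, rfl, fun _ => rfl⟩
    | succ t ih =>
      intro htm
      obtain ⟨h1, h2, h3, h4⟩ := ih (by omega)
      set gt := (List.range t).foldl (fun out b =>
          (List.range s).foldl (fun out c =>
            (List.range s).foldl (fun out d => pySet2 out (R + c) (b*s + d) (row.getD b [])) out) out) g with hgt
      have hfold : (List.range (t+1)).foldl (fun out b =>
          (List.range s).foldl (fun out c =>
            (List.range s).foldl (fun out d => pySet2 out (R + c) (b*s + d) (row.getD b [])) out) out) g
          = (List.range s).foldl (fun out c =>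
            (List.range s).foldl (fun out d => pySet2 out (R + c) (t*s + d) (row.getD t [])) out) gt := by
        rw [List.range_succ, List.foldl_append]; rfl
      have hRl : R + s ≤ gt.length := by omega
      have hWl : ∀ i, i < gt.length → t*s + s ≤ (gt.getD i []).length := by
        intro i hi
        rw [h4]
        have h5 := hW i (by omega)
        have h6 : (t+1) * s ≤ m * s := Nat.mul_le_mul_right s htm
        have h7 : (t+1) * s = t*s + s := by ring
        omega
      obtain ⟨c1, c2, c3, c4⟩ := upscale_cfold s R (t*s) (row.getD t []) gt hRl hWl
      refine ⟨?_, ?_, ?_, ?_⟩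
      · intro b hb c hc d hd
        rw [hfold]
        by_cases hbt : b = t
        · subst hbt; exact c1 c hc d hd
        · have hblt : b < t := by omega
          have hdisj : b*s + d < t*s := upscale_block_lt hblt hd
          rw [c2 _ _ (by omega), h1 b hblt c hc d hd]
      · intro i j hcond
        rw [hfold, c2 i j (by omega), h2 i j (by omega)]
      · rw [hfold, c3]; exact h3
      · intro i; rw [hfold, c4]; exact h4 i
  exact main m le_rfl

theorem upscale_afold (s n m : Nat) (p : List (List (List Int))) (g : List (List (List Int)))
    (hL : g.length = n * s) (hW : ∀ i, i < g.length → (g.getD i []).length = m * s) :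
    let g' := (List.range n).foldl (fun out a =>
        (List.range m).foldl (fun out b =>
          (List.range s).foldl (fun out c =>
            (List.range s).foldl (fun out d => pySet2 out (a*s + c) (b*s + d) ((p.getD a []).getD b [])) out) out) out) g
    (∀ a < n, ∀ b < m, ∀ c < s, ∀ d < s, gg g' (a*s + c) (b*s + d) = (p.getD a []).getD b []) ∧
    g'.length = g.length ∧ (∀ i, (g'.getD i []).length = (g.getD i []).length) := by
  have main : ∀ (t : Nat), t ≤ n →
      let g' := (List.range t).foldl (fun out a =>
          (List.range m).foldl (fun out b =>
            (List.range s).foldl (fun out c =>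
              (List.range s).foldl (fun out d => pySet2 out (a*s + c) (b*s + d) ((p.getD a []).getD b [])) out) out) out) g
      (∀ a < t, ∀ b < m, ∀ c < s, ∀ d < s, gg g' (a*s + c) (b*s + d) = (p.getD a []).getD b []) ∧
      g'.length = g.length ∧ (∀ i, (g'.getD i []).length = (g.getD i []).length) := by
    intro t
    induction t with
    | zero => exact fun _ => ⟨by omega, rfl, fun _ => rfl⟩
    | succ t ih =>
      intro htn
      obtain ⟨h1, h3, h4⟩ := ih (by omega)
      set gt := (List.range t).foldl (fun out a =>
          (List.range m).foldl (fun out b =>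
            (List.range s).foldl (fun out c =>
              (List.range s).foldl (fun out d => pySet2 out (a*s + c) (b*s + d) ((p.getD a []).getD b [])) out) out) out) g with hgt
      have hfold : (List.range (t+1)).foldl (fun out a =>
          (List.range m).foldl (fun out b =>
            (List.range s).foldl (fun out c =>
              (List.range s).foldl (fun out d => pySet2 out (a*s + c) (b*s + d) ((p.getD a []).getD b [])) out) out) out) g
          = (List.range m).foldl (fun out b =>
            (List.range s).foldl (fun out c =>
              (List.range s).foldl (fun out d => pySet2 out (t*s + c) (b*s + d) ((p.getD t []).getD b [])) out) out) gt := by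
        rw [List.range_succ, List.foldl_append]; rfl
      have hRl : t*s + s ≤ gt.length := by
        have h6 : (t+1) * s ≤ n * s := Nat.mul_le_mul_right s htn
        have h7 : (t+1) * s = t*s + s := by ring
        omega
      have hWl : ∀ i, i < gt.length → m * s ≤ (gt.getD i []).length := by
        intro i hi
        rw [h4]
        rw [hW i (by omega)]
      obtain ⟨b1, b2, b3, b4⟩ := upscale_bfold s (t*s) m (p.getD t []) gt hRl hWl
      refine ⟨?_, ?_, ?_⟩
      · intro a ha b hb c hc d hd
        rw [hfold]
        by_cases hat : a = t
        · subst hat; exact b1 b hb c hc d hd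
        · have halt : a < t := by omega
          have hdisj : a*s + c < t*s := upscale_block_lt halt hc
          rw [b2 _ _ (by omega), h1 a halt b hb c hc d hd]
      · rw [hfold, b3]; exact h3
      · intro i; rw [hfold, b4]; exact h4 i
  exact main n le_rfl

theorem upscale_flatrep_len {α β : Type} (l : List α) (s : Nat) (f : α → β) :
    (l.flatMap (fun x => List.replicate s (f x))).length = l.length * s := by
  induction l with
  | nil => simp
  | cons h t ih => simp [List.flatMap_cons, ih]; ring

theorem upscale_flatrep_get {α β : Type} (l : List α) (s : Nat) (f : α → β) (dflt : α)
    (a c : Nat) (ha : a < l.length) (hc : c < s) :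
    (l.flatMap (fun x => List.replicate s (f x)))[a*s + c]? = some (f (l.getD a dflt)) := by
  induction l generalizing a with
  | nil => simp at ha
  | cons h t ih =>
    rw [List.flatMap_cons]
    cases a with
    | zero =>
      have h0 : 0*s + c = c := by ring
      rw [h0, List.getElem?_append_left (by simpa using hc), List.getElem?_replicate, if_pos hc]
      rfl
    | succ a =>
      have hidx : (a+1)*s + c = s + (a*s + c) := by ring
      rw [hidx, List.getElem?_append_right (by simp), List.length_replicate]
      have h2 : s + (a*s + c) - s = a*s + c := by omega
      have ha' : a < t.length := by simp at ha; omega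
      rw [h2, ih a ha']
      rfl

theorem upscale_bfold_closed (s : Nat) (scaled : List (List Int) → List (List Int))
    (l acc : List (List (List Int))) :
    l.foldl (fun out row => out ++ List.replicate s (scaled row)) acc
      = acc ++ l.flatMap (fun row => List.replicate s (scaled row)) := by
  induction l generalizing acc with
  | nil => simp
  | cons h t ih => simp [List.foldl_cons, ih]

-- A after its first phase: the scatter fold applied to the pre-allocated empty grid
theorem upscale_A_closed (p : List (List (List Int))) (scale limx limy : Int) :
    upscale p scale limx limy =
      (List.range p.length).foldl (fun out a =>
        (List.range (p.headD []).length).foldl (fun out b =>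
          (List.range scale.toNat).foldl (fun out c =>
            (List.range scale.toNat).foldl (fun out d =>
              pySet2 out (a*scale.toNat + c) (b*scale.toNat + d) ((p.getD a []).getD b [])) out) out) out)
        (List.replicate (p.length * scale.toNat)
          (List.replicate ((p.headD []).length * scale.toNat) ([] : List Int))) := by
  unfold upscale
  simp only [upscale_toNat_cast_mul]
  have h1 : (List.range ((p.headD []).length * scale.toNat)).foldl
      (fun row (_ : Nat) => row ++ [([] : List Int)]) []
      = List.replicate ((p.headD []).length * scale.toNat) ([] : List Int) := by
    rw [upscale_foldl_snoc, List.nil_append]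
  rw [h1, upscale_foldl_snoc (p.length * scale.toNat)
    (List.replicate ((p.headD []).length * scale.toNat) ([] : List Int)) [], List.nil_append]

theorem upscale_eq_alt (p : List (List (List Int))) (scale limx limy : Int) :
    upscale p scale limx limy = upscale_alt p scale limx limy := by
  by_cases hs : scale.toNat = 0
  · -- scale ≤ 0: both return []
    rw [upscale_A_closed p scale limx limy]
    unfold upscale_alt
    simp only [hs, Nat.mul_zero, List.range_zero, List.foldl_nil, List.replicate_zero,
      List.append_nil, upscale_foldl_id]
  · have hspos : 0 < scale.toNat := Nat.pos_of_ne_zero hs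
    have hW0 : ∀ i, i < (List.replicate (p.length * scale.toNat)
        (List.replicate ((p.headD []).length * scale.toNat) ([] : List Int))).length →
        (((List.replicate (p.length * scale.toNat)
          (List.replicate ((p.headD []).length * scale.toNat) ([] : List Int)))).getD i []).length
          = (p.headD []).length * scale.toNat := by
      intro i hi
      rw [List.length_replicate] at hi
      rw [List.getD_eq_getElem?_getD, List.getElem?_replicate, if_pos hi]
      simp
    obtain ⟨hchar, hlen, hrowlen⟩ := upscale_afold scale.toNat p.length (p.headD []).length p
      (List.replicate (p.length * scale.toNat)
        (List.replicate ((p.headD []).length * scale.toNat) ([] : List Int)))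
      (by simp) hW0
    have hALen : (upscale p scale limx limy).length = p.length * scale.toNat := by
      rw [upscale_A_closed, hlen, List.length_replicate]
    have hARow : ∀ i, i < p.length * scale.toNat →
        ((upscale p scale limx limy).getD i []).length = (p.headD []).length * scale.toNat := by
      intro i hi
      rw [upscale_A_closed, hrowlen i, hW0 i (by simpa using hi)]
    have hAgg : ∀ a < p.length, ∀ b < (p.headD []).length, ∀ c < scale.toNat, ∀ d < scale.toNat,
        gg (upscale p scale limx limy) (a*scale.toNat + c) (b*scale.toNat + d)
          = (p.getD a []).getD b [] := by
      intro a ha b hb c hc d hd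
      rw [upscale_A_closed]
      exact hchar a ha b hb c hc d hd
    have hB2 : upscale_alt p scale limx limy = p.flatMap (fun row => List.replicate scale.toNat
        ((List.range (p.headD []).length).flatMap
          (fun b => List.replicate scale.toNat (row.getD b [])))) := by
      have hB := upscale_bfold_closed scale.toNat
        (fun row => (List.range (p.headD []).length).flatMap
          (fun b => List.replicate scale.toNat (row.getD b []))) p []
      rw [List.nil_append] at hB
      exact hB
    rw [hB2]
    apply List.ext_getElem?
    intro i
    by_cases hi : i < p.length * scale.toNat
    · have ha : i / scale.toNat < p.length := (Nat.div_lt_iff_lt_mul hspos).mpr hi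
      have hc : i % scale.toNat < scale.toNat := Nat.mod_lt _ hspos
      have hdecomp : i / scale.toNat * scale.toNat + i % scale.toNat = i := by
        rw [Nat.mul_comm]; exact Nat.div_add_mod i scale.toNat
      have hBi := upscale_flatrep_get p scale.toNat
        (fun row => (List.range (p.headD []).length).flatMap
          (fun b => List.replicate scale.toNat (row.getD b []))) []
        (i / scale.toNat) (i % scale.toNat) ha hc
      rw [hdecomp] at hBi
      rw [hBi]
      have hAi : (upscale p scale limx limy)[i]?
          = some ((upscale p scale limx limy).getD i []) := by
        rw [List.getD_eq_getElem (upscale p scale limx limy) []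
          (by omega : i < (upscale p scale limx limy).length)]
        exact List.getElem?_eq_getElem _
      rw [hAi]
      congr 1
      have hlenrow := hARow i hi
      apply List.ext_getElem?
      intro j
      by_cases hj : j < (p.headD []).length * scale.toNat
      · have hb : j / scale.toNat < (p.headD []).length := (Nat.div_lt_iff_lt_mul hspos).mpr hj
        have hd : j % scale.toNat < scale.toNat := Nat.mod_lt _ hspos
        have hjdec : j / scale.toNat * scale.toNat + j % scale.toNat = j := by
          rw [Nat.mul_comm]; exact Nat.div_add_mod j scale.toNat
        have hrow := upscale_flatrep_get (List.range (p.headD []).length) scale.toNat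
          (fun b => (p.getD (i / scale.toNat) []).getD b []) 0
          (j / scale.toNat) (j % scale.toNat) (by simpa using hb) hd
        rw [hjdec] at hrow
        have hrange : (List.range (p.headD []).length).getD (j / scale.toNat) 0 = j / scale.toNat := by
          rw [List.getD_eq_getElem?_getD, List.getElem?_range hb]
          rfl
        rw [hrange] at hrow
        rw [hrow]
        have hAj : ((upscale p scale limx limy).getD i [])[j]?
            = some (((upscale p scale limx limy).getD i []).getD j []) := by
          rw [List.getD_eq_getElem _ _ (by omega : j < ((upscale p scale limx limy).getD i []).length)]
          exact List.getElem?_eq_getElem _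
        rw [hAj]
        congr 1
        have hfin := hAgg (i / scale.toNat) ha (j / scale.toNat) hb
          (i % scale.toNat) hc (j % scale.toNat) hd
        rw [hdecomp, hjdec] at hfin
        exact hfin
      · rw [List.getElem?_eq_none (by omega : ((upscale p scale limx limy).getD i []).length ≤ j),
          List.getElem?_eq_none (by rw [upscale_flatrep_len, List.length_range]; omega)]
    · rw [List.getElem?_eq_none (by omega : (upscale p scale limx limy).length ≤ i),
        List.getElem?_eq_none (by rw [upscale_flatrep_len]; omega)]

-- ===== VERDICT (by name: the statement is the Claim_ definition above) =====
theorem upscale_spec : Claim_equal_upscale := by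
  intro p scale limx limy _ _
  unfold Spec_upscale
  exact upscale_eq_alt p scale limx limy
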